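-- pv_equiv track=rewrite | github.com/VivianBrandenburg/qtools | qtools/src/qtools/relative_relevance/utils.py | merge_runs_by_epoch
-- ===== SOURCE A (Python) =====
-- def merge_runs_by_epoch(model_paths, num_epochs=100):
--     """
--     Merge and combine results from multiple runs by epoch.
--     Args:
--         model_paths (dict): Model path to data mapping.
--         num_epochs (int): Number of epochs to merge.
--     Returns:
--         merged_generative, merged_random (list of lists)
--     """
--     merged_generative, merged_random = [], []
--     for (path, data), res in zip(model_paths.items(), [merged_random, merged_generative]):
--         for i in range(num_epochs):
--             combined = []
--             for run in data:
--                 if len(run) > i: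
--                     combined.extend(run[i])
--             res.append(combined)
--     return merged_generative, merged_random
-- ===== SOURCE B (Python) =====
-- def _transpose(data, n):
--     """Single pass over the runs, maintaining all n epoch buckets at once."""
--     buckets = [[] for _ in range(n)]
--     for run in data:
--         for i in range(min(len(run), n)):
--             buckets[i].extend(run[i])
--     return buckets
--
--
-- def merge_runs_by_epoch(model_paths, num_epochs=100):
--     n = max(num_epochs, 0)
--     datas = list(model_paths.values())
--     merged_random = _transpose(datas[0], n) if len(datas) >= 1 else []
--     merged_generative = _transpose(datas[1], n) if len(datas) >= 2 else []
--     return merged_generative, merged_random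
-- ===== Notes on version B (the rewrite author's own statement) =====
-- stated objective: faster
-- what changed: A rebuilds each epoch bucket by re-scanning every run once per epoch (num_epochs x runs guard checks); B pre-allocates all num_epochs buckets and makes a single pass over the runs, extending only buckets[0..min(len(run),num_epochs)) in place, with the two-group dispatch done by positional destructuring of the dict values instead of the zip-with-mutable-lists trick.
import Mathlib
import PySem

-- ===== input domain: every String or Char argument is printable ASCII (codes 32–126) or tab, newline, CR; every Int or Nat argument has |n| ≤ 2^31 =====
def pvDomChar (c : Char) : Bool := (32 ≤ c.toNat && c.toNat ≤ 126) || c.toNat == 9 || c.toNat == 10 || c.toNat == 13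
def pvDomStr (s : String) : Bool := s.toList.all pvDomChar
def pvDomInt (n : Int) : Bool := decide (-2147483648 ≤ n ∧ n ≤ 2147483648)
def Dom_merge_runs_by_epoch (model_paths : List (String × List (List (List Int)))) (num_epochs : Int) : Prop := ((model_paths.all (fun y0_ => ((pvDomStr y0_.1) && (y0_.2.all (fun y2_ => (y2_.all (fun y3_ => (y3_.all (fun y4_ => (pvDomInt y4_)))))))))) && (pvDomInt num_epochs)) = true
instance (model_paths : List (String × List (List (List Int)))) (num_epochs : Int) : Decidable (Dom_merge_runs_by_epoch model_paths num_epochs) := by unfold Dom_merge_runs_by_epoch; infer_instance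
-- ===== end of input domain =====

-- B replaces A's per-epoch re-scan of all runs by one pass over the runs maintaining
-- all epoch buckets (objective: faster on runs shorter than num_epochs).

-- ===== PORT A =====
-- inner loop 'for run in data: if len(run) > i: combined.extend(run[i])'
def pvCombineA (data : List (List (List Int))) (i : Int) : List Int :=
  data.foldl
    (fun combined run =>
      if (run.length : Int) > i then combined ++ PySem.List.pyGetD run i [] else combined)
    []

-- 'for i in range(num_epochs): res.append(combined)'
def pvEpochsA (data : List (List (List Int))) (num_epochs : Int) : List (List Int) :=
  (PySem.List.pyRange 0 num_epochs 1).foldl (fun res i => res ++ [pvCombineA data i]) []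

-- 'zip(model_paths.items(), [merged_random, merged_generative])' pairs at most the
-- first two dict entries: the first fills merged_random, the second merged_generative.
def merge_runs_by_epoch (model_paths : List (String × List (List (List Int)))) (num_epochs : Int) : List (List Int) × List (List Int) :=
  match model_paths with
  | [] => ([], [])
  | (_, d0) :: rest =>
    match rest with
    | [] => ([], pvEpochsA d0 num_epochs)
    | (_, d1) :: _ => (pvEpochsA d1 num_epochs, pvEpochsA d0 num_epochs)

-- ===== PORT B =====
-- _transpose: pre-allocate n buckets, then one pass over runs:
-- 'for i in range(min(len(run), n)): buckets[i].extend(run[i])'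
def pvTransposeB (data : List (List (List Int))) (n : Nat) : List (List Int) :=
  data.foldl
    (fun buckets run =>
      (List.range (min run.length n)).foldl
        (fun bs i => bs.modify i (fun b => b ++ run.getD i [])) buckets)
    (List.replicate n [])

def merge_runs_by_epoch_alt (model_paths : List (String × List (List (List Int)))) (num_epochs : Int) : List (List Int) × List (List Int) :=
  let n := (max num_epochs 0).toNat
  match model_paths with
  | [] => ([], [])
  | (_, d0) :: rest =>
    match rest with
    | [] => ([], pvTransposeB d0 n)
    | (_, d1) :: _ => (pvTransposeB d1 n, pvTransposeB d0 n)

-- ===== PRECONDITION & SPEC =====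
def Spec_merge_runs_by_epoch (model_paths : List (String × List (List (List Int)))) (num_epochs : Int) (out : List (List Int) × List (List Int)) : Prop := out = merge_runs_by_epoch_alt model_paths num_epochs
instance (model_paths : List (String × List (List (List Int)))) (num_epochs : Int) (out : List (List Int) × List (List Int)) : Decidable (Spec_merge_runs_by_epoch model_paths num_epochs out) := by unfold Spec_merge_runs_by_epoch; infer_instance

-- ===== CLAIM (what is proved, stated in full; the proofs are below) =====
def Claim_equal_merge_runs_by_epoch : Prop := ∀ (model_paths : List (String × List (List (List Int)))) (num_epochs : Int), Dom_merge_runs_by_epoch model_paths num_epochs → Spec_merge_runs_by_epoch model_paths num_epochs (merge_runs_by_epoch model_paths num_epochs)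

-- ===== LEMMAS AND PROOFS =====

-- appending singletons in a fold is mapping
theorem pv_foldl_snoc (l : List Int) (g : Int → List Int) (acc : List (List Int)) :
    l.foldl (fun res i => res ++ [g i]) acc = acc ++ l.map g := by
  induction l generalizing acc with
  | nil => simp
  | cons x xs ih => simp [List.foldl_cons, ih]

-- one modify on a range-map
theorem pv_modify_map_range (n m : Nat) (g : Nat → List Int) (h : List Int → List Int)
    (hm : m < n) :
    ((List.range n).map g).modify m h
      = (List.range n).map (fun k => if k = m then h (g m) else g k) := by
  apply List.ext_getElem
  · simp
  · intro k hk hk'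
    simp only [List.length_modify, List.length_map, List.length_range] at hk
    rw [List.getElem_modify]
    simp only [List.getElem_map, List.getElem_range]
    by_cases hkm : k = m
    · subst hkm; simp
    · have hmk : m ≠ k := fun e => hkm e.symm
      simp [hkm, hmk]

-- the inner bucket-update loop of B, on a range-map state
theorem pv_foldmod (run : List (List Int)) (n : Nat) (g : Nat → List Int) :
    ∀ m, m ≤ n → m ≤ run.length →
    (List.range m).foldl (fun bs i => bs.modify i (fun b => b ++ run.getD i []))
        ((List.range n).map g)
      = (List.range n).map (fun k => if k < m then g k ++ run.getD k [] else g k) := by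
  intro m
  induction m with
  | zero => intro _ _; simp
  | succ m ih =>
    intro h1 h2
    rw [List.range_succ, List.foldl_append, ih (by omega) (by omega)]
    simp only [List.foldl_cons, List.foldl_nil]
    rw [pv_modify_map_range n m _ _ (by omega)]
    apply List.map_congr_left
    intro k _
    by_cases hkm : k = m
    · subst hkm; simp
    · have hmk : m ≠ k := fun e => hkm e.symm
      by_cases hk : k < m
      · have h4 : k < m + 1 := by omega
        simp [hk, h4]
        intro e; exact absurd e hkm
      · have h4 : ¬ k < m + 1 := by omega
        simp [hk, h4]
        intro e; exact absurd e hkm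

-- one run of B's outer loop turns bucket k into A's step at epoch k
theorem pv_addRun (run : List (List Int)) (n : Nat) (g : Nat → List Int) :
    (List.range (min run.length n)).foldl
        (fun bs i => bs.modify i (fun b => b ++ run.getD i [])) ((List.range n).map g)
      = (List.range n).map (fun (k : Nat) =>
          if (run.length : Int) > (k : Int) then g k ++ PySem.List.pyGetD run (k : Int) [] else g k) := by
  rw [pv_foldmod run n g (min run.length n) (by omega) (by omega)]
  apply List.map_congr_left
  intro k hk
  simp only [List.mem_range] at hk
  rw [PySem.List.pyGetD_natCast]
  by_cases h : k < run.length
  · have h1 : k < min run.length n := by omega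
    have h2 : ((k : Int) < (run.length : Int)) := by omega
    simp [h1, h2]
  · have h1 : ¬ k < min run.length n := by omega
    have h2 : ¬ ((k : Int) < (run.length : Int)) := by omega
    simp [h1, h2]

-- B's whole fold over the runs, pointwise per bucket
theorem pv_transposeB_fold (data : List (List (List Int))) (n : Nat) :
    ∀ g : Nat → List Int,
    data.foldl
        (fun buckets run =>
          (List.range (min run.length n)).foldl
            (fun bs i => bs.modify i (fun b => b ++ run.getD i [])) buckets)
        ((List.range n).map g)
      = (List.range n).map (fun (k : Nat) =>
          data.foldl
            (fun c run =>
              if (run.length : Int) > (k : Int) then c ++ PySem.List.pyGetD run (k : Int) [] else c)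
            (g k)) := by
  induction data with
  | nil => intro g; rfl
  | cons run rest ih =>
    intro g
    simp only [List.foldl_cons]
    rw [pv_addRun run n g, ih]

-- the two transposes agree
theorem pv_main (data : List (List (List Int))) (num_epochs : Int) :
    pvEpochsA data num_epochs = pvTransposeB data (max num_epochs 0).toNat := by
  unfold pvEpochsA pvTransposeB
  rw [pv_foldl_snoc, PySem.List.pyRange_one]
  have hrep : List.replicate (max num_epochs 0).toNat ([] : List Int)
      = (List.range (max num_epochs 0).toNat).map (fun _ => []) := by
    rw [List.map_const', List.length_range]
  rw [hrep, pv_transposeB_fold]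
  have hn : (num_epochs - 0).toNat = (max num_epochs 0).toNat := by omega
  rw [hn]
  simp only [List.nil_append, List.map_map]
  apply List.map_congr_left
  intro k _
  simp [pvCombineA, Function.comp]

-- ===== VERDICT (by name: the statement is the Claim_ definition above) =====
theorem merge_runs_by_epoch_spec : Claim_equal_merge_runs_by_epoch := by
  intro model_paths num_epochs _
  unfold Spec_merge_runs_by_epoch merge_runs_by_epoch merge_runs_by_epoch_alt
  match model_paths with
  | [] => rfl
  | [(_, d0)] => simp [pv_main]
  | (_, d0) :: (_, d1) :: _ => simp [pv_main]
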